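-- pv_equiv track=rewrite | github.com/vignek/CodePractice | Interview-Practice/Python-Solutions/Arrays/12_common_items.py | isItemPresentusingDictionaries
-- ===== SOURCE A (Python) =====
-- def isItemPresentusingDictionaries(array_1, array_2):
--     result = {}
--
--     for i in array_1:
--         if i not in result.keys():
--             result[i] = True
--
--     for item in array_2:
--         if item in result.keys():
--             return result[item]
--
--     return False
-- ===== SOURCE B (Python) =====
-- def isItemPresentusingDictionaries(array_1, array_2):
--     xs = sorted(array_1)
--     ys = sorted(array_2)
--     i = j = 0
--     while i < len(xs) and j < len(ys):
--         if xs[i] == ys[j]: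
--             return True
--         if xs[i] < ys[j]:
--             i += 1
--         else:
--             j += 1
--     return False
-- ===== Notes on version B (the rewrite author's own statement) =====
-- stated objective: alternative
-- what changed: Replaces the hash-table build-then-stream scan with sort both arrays and a two-pointer merge walk that advances the smaller head until a common element is found.
import Mathlib
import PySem

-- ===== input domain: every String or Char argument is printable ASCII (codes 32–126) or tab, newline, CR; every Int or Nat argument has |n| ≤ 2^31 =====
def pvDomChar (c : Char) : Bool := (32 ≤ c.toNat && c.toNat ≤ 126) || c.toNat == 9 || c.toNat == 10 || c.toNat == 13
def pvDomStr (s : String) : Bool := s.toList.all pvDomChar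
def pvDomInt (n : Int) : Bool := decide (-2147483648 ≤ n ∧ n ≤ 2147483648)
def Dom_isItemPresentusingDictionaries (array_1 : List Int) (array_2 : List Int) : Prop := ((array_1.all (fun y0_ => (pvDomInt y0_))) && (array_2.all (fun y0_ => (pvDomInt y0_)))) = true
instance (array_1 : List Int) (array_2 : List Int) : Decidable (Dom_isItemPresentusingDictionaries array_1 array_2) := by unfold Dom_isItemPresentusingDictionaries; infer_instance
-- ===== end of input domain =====

-- B replaces A's dict-build-then-stream scan with sort-both + a two-pointer
-- merge walk (alternative decomposition; return value only, no mutation).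

-- ===== PORT A =====
-- second loop: 'return result[item]' is guarded by 'item in result.keys()', so
-- the key is present and '(get? item).getD false' is exact there (no default reached)
def pvALoop2 (d : PySem.Dict Int Bool) : List Int → Bool
  | [] => false
  | item :: rest =>
    if d.contains item then (d.get? item).getD false else pvALoop2 d rest

def isItemPresentusingDictionaries (array_1 : List Int) (array_2 : List Int) : Bool :=
  let result : PySem.Dict Int Bool :=
    array_1.foldl (fun d i => if ¬ d.contains i then d.insert i true else d) PySem.Dict.empty
  pvALoop2 result array_2

-- ===== PORT B =====
-- Source B's while loop over indices i, j, written as recursion on the two suffixes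
def pvMerge : List Int → List Int → Bool
  | [], _ => false
  | _, [] => false
  | x :: xs, y :: ys =>
    if x = y then true
    else if x < y then pvMerge xs (y :: ys)
    else pvMerge (x :: xs) ys

def isItemPresentusingDictionaries_alt (array_1 : List Int) (array_2 : List Int) : Bool :=
  pvMerge (PySem.List.sorted array_1 (fun x => x) false)
          (PySem.List.sorted array_2 (fun x => x) false)

-- ===== PRECONDITION & SPEC =====
def Spec_isItemPresentusingDictionaries (array_1 : List Int) (array_2 : List Int) (out : Bool) : Prop := out = isItemPresentusingDictionaries_alt array_1 array_2
instance (array_1 : List Int) (array_2 : List Int) (out : Bool) : Decidable (Spec_isItemPresentusingDictionaries array_1 array_2 out) := by unfold Spec_isItemPresentusingDictionaries; infer_instance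

-- ===== CLAIM =====
def Claim_equal_isItemPresentusingDictionaries : Prop := ∀ (array_1 : List Int) (array_2 : List Int), Dom_isItemPresentusingDictionaries array_1 array_2 → Spec_isItemPresentusingDictionaries array_1 array_2 (isItemPresentusingDictionaries array_1 array_2)

-- ===== LEMMAS AND PROOFS =====

-- the dict built by A's first loop: membership is list membership in array_1
lemma pvBuild_contains (xs : List Int) (d : PySem.Dict Int Bool) (k : Int) :
    (xs.foldl (fun d i => if ¬ d.contains i then d.insert i true else d) d).contains k
      = (d.contains k || xs.contains k) := by
  induction xs generalizing d with
  | nil => simp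
  | cons x rest ih =>
    simp only [List.foldl_cons, ih]
    by_cases hx : d.contains x = true
    · rw [if_neg (by simp [hx])]
      by_cases hk : k = x <;> simp [hk, hx]
    · rw [if_pos (by simp [hx]), PySem.Dict.contains_insert]
      by_cases hk : k = x
      · simp [hk, hx]
      · have hb : (k == x) = false := by simpa using hk
        simp [hb, hk]

-- every value stored by A's first loop is 'true'
lemma pvBuild_get (xs : List Int) (d : PySem.Dict Int Bool)
    (hd : ∀ k v, d.get? k = some v → v = true) (k : Int) (v : Bool) :
    (xs.foldl (fun d i => if ¬ d.contains i then d.insert i true else d) d).get? k = some v → v = true := by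
  induction xs generalizing d with
  | nil => exact hd k v
  | cons x rest ih =>
    simp only [List.foldl_cons]
    refine ih _ ?_
    intro k' v'
    by_cases hx : d.contains x = true
    · rw [if_neg (by simp [hx])]; exact hd k' v'
    · rw [if_pos (by simp [hx])]
      by_cases hk : k' = x
      · subst hk; rw [PySem.Dict.get?_insert_self]; rintro ⟨⟩; rfl
      · rw [PySem.Dict.get?_insert_of_ne _ _ hk]; exact hd k' v'

-- A's second loop on a dict whose values are all true: any-membership scan
lemma pvALoop2_eq_any (ys : List Int) (d : PySem.Dict Int Bool)
    (hd : ∀ k v, d.get? k = some v → v = true) :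
    pvALoop2 d ys = ys.any (fun y => d.contains y) := by
  induction ys with
  | nil => rfl
  | cons y rest ih =>
    simp only [pvALoop2, List.any_cons]
    by_cases hy : d.contains y = true
    · have : ∃ v, d.get? y = some v := by
        have := PySem.Dict.contains_eq_isSome_get? (d := d) (k := y)
        rw [hy] at this
        exact Option.isSome_iff_exists.mp this.symm
      obtain ⟨v, hv⟩ := this
      simp [hy, hv, hd y v hv]
    · simp [hy, ih]

-- the merge walk on two weakly increasing lists decides existence of a common element
lemma pvMerge_iff (xs : List Int) : ∀ ys, xs.Pairwise (· ≤ ·) → ys.Pairwise (· ≤ ·) →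
    (pvMerge xs ys = true ↔ ∃ z, z ∈ xs ∧ z ∈ ys) := by
  induction xs with
  | nil => intro ys _ _; simp [pvMerge]
  | cons x xs ihx =>
    intro ys
    induction ys with
    | nil => intro _ _; simp [pvMerge]
    | cons y ys ihy =>
      intro hx hy
      rw [List.pairwise_cons] at hx hy
      simp only [pvMerge]
      by_cases hxy : x = y
      · subst hxy
        simp
      · rw [if_neg hxy]
        by_cases hlt : x < y
        · rw [if_pos hlt, ihx (y :: ys) hx.2 (List.pairwise_cons.mpr hy)]
          constructor
          · rintro ⟨z, hz1, hz2⟩; exact ⟨z, List.mem_cons_of_mem _ hz1, hz2⟩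
          · rintro ⟨z, hz1, hz2⟩
            rcases List.mem_cons.mp hz1 with h | h
            · subst h
              rcases List.mem_cons.mp hz2 with h2 | h2
              · exact absurd h2 hxy
              · exact absurd (hy.1 z h2) (by omega)
            · exact ⟨z, h, hz2⟩
        · rw [if_neg hlt,
              ihy (List.pairwise_cons.mpr hx) hy.2]
          constructor
          · rintro ⟨z, hz1, hz2⟩; exact ⟨z, hz1, List.mem_cons_of_mem _ hz2⟩
          · rintro ⟨z, hz1, hz2⟩
            rcases List.mem_cons.mp hz2 with h | h
            · subst h
              rcases List.mem_cons.mp hz1 with h2 | h2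
              · exact absurd h2.symm hxy
              · exact absurd (hx.1 z h2) (by omega)
            · exact ⟨z, hz1, h⟩

theorem pvMain : ∀ (array_1 : List Int) (array_2 : List Int),
    isItemPresentusingDictionaries array_1 array_2 = isItemPresentusingDictionaries_alt array_1 array_2 := by
  intro a1 a2
  unfold isItemPresentusingDictionaries isItemPresentusingDictionaries_alt
  rw [pvALoop2_eq_any _ _ (pvBuild_get a1 PySem.Dict.empty
    (by intro k v h; rw [PySem.Dict.get?_empty] at h; simp at h))]
  have hA : (a2.any fun y =>
      (a1.foldl (fun d i => if ¬ d.contains i then d.insert i true else d) PySem.Dict.empty).contains y)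
      = true ↔ ∃ z, z ∈ a1 ∧ z ∈ a2 := by
    simp only [List.any_eq_true, pvBuild_contains, PySem.Dict.contains_empty, Bool.false_or]
    constructor
    · rintro ⟨z, hz2, hz1⟩; exact ⟨z, by simpa using hz1, hz2⟩
    · rintro ⟨z, hz1, hz2⟩; exact ⟨z, hz2, by simpa using hz1⟩
  have hB : pvMerge (PySem.List.sorted a1 (fun x => x) false)
      (PySem.List.sorted a2 (fun x => x) false) = true ↔ ∃ z, z ∈ a1 ∧ z ∈ a2 := by
    rw [pvMerge_iff _ _ (by simpa using PySem.List.sorted_pairwise a1 (fun x => x))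
        (by simpa using PySem.List.sorted_pairwise a2 (fun x => x))]
    simp [PySem.List.mem_sorted]
  by_cases h : ∃ z, z ∈ a1 ∧ z ∈ a2
  · rw [hA.mpr h, (hB.mpr h).symm]
  · rw [Bool.eq_false_iff.mpr (fun hc => h (hA.mp hc)),
        Bool.eq_false_iff.mpr (fun hc => h (hB.mp hc))]

-- ===== VERDICT =====
theorem isItemPresentusingDictionaries_spec : Claim_equal_isItemPresentusingDictionaries := by
  intro a1 a2 _
  exact pvMain a1 a2
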